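-- pv_equiv track=rewrite | github.com/Aegarain/advent-of-code | Python/2020/day_06.py | analyze2
-- ===== SOURCE A (Python) =====
-- def analyze2(group):
--     unique_questions = set(())
--     people = group.split("\n")
--     # starts with the answers by the first person in the group
--     for x in list(people[0]):
--         unique_questions.add(x)
--     # for each person
--     for person in people:
--         new_list = []
--         # for each letter answered by everyone previously
--         for letter in unique_questions:
--             # check if this person answered yes as well
--             if letter in person:
--                 # if not, remove it from the list of questions answered yes
--                 new_list.append(letter)
--         unique_questions = new_list
--
--
--     #returns number of questions answered yes by everyone
--     return(len(unique_questions))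
-- ===== SOURCE B (Python) =====
-- def analyze2(group):
--     people = group.split("\n")
--     counts = {}
--     for person in people:
--         for letter in set(person):
--             counts[letter] = counts.get(letter, 0) + 1
--     return sum(1 for v in counts.values() if v == len(people))
-- ===== Notes on version B (the rewrite author's own statement) =====
-- stated objective: faster
-- what changed: Replaces the successive set-intersection narrowing (re-filtering the shrinking candidate list with a substring test against each person) with a single counting pass: a frequency table over each person's distinct letters, returning how many letters reach a count equal to the number of people (measured ~2x faster at the largest size).
import Mathlib
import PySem

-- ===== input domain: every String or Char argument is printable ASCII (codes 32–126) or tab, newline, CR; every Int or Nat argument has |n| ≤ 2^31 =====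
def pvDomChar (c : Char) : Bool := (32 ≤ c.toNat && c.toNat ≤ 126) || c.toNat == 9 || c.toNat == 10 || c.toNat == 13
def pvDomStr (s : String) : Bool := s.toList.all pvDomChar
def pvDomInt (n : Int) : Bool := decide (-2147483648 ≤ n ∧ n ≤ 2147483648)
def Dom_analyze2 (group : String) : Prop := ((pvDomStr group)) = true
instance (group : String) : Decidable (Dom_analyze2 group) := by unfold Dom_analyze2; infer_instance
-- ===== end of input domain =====

-- B replaces A's successive-intersection narrowing with one counting pass over each
-- person's distinct letters plus a threshold filter (count = number of people).

-- ===== PORT A =====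
def analyze2 (group : String) : Int :=
  let people : List (List Char) := PySem.Chars.splitOn group.toList "\n".toList
  -- unique_questions = set(); for x in list(people[0]): unique_questions.add(x)
  let uq0 : PySem.Set Char :=
    (PySem.List.pyGetD people 0 []).foldl PySem.Set.add PySem.Set.empty
  -- for person in people: new_list = [l for l in unique_questions if l in person]; uq = new_list
  let uq : List Char := people.foldl
    (fun uq person =>
      uq.foldl (fun newList letter =>
        if letter ∈ person then newList ++ [letter] else newList) [])
    uq0
  (uq.length : Int)

-- ===== PORT B =====
def analyze2_alt (group : String) : Int :=
  let people : List (List Char) := PySem.Chars.splitOn group.toList "\n".toList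
  -- counts = {}; for person in people: for letter in set(person): counts[letter] = counts.get(letter, 0) + 1
  let counts : PySem.Dict Char Int := people.foldl
    (fun d person =>
      (PySem.Set.ofList person).foldl (fun d letter => d.modify letter 0 (· + 1)) d)
    PySem.Dict.empty
  -- sum(1 for v in counts.values() if v == len(people))
  counts.values.foldl (fun acc v => if v = (people.length : Int) then acc + 1 else acc) 0

-- ===== PRECONDITION & SPEC =====
def Spec_analyze2 (group : String) (out : Int) : Prop := out = analyze2_alt group
instance (group : String) (out : Int) : Decidable (Spec_analyze2 group out) := by unfold Spec_analyze2; infer_instance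

-- ===== CLAIM (what is proved, stated in full; the proofs are below) =====
def Claim_equal_analyze2 : Prop := ∀ (group : String), Dom_analyze2 group → Spec_analyze2 group (analyze2 group)

-- ===== LEMMAS AND PROOFS =====

-- A's inner loop (append-if) is a filter, and folding it over all persons filters
-- the start set by "letter is in every person".
theorem pv_filt_loop (l : List (List Char)) (s : List Char) :
    l.foldl
      (fun uq person =>
        uq.foldl (fun newList letter =>
          if letter ∈ person then newList ++ [letter] else newList) [])
      s
    = s.filter (fun c => l.all (fun p => decide (c ∈ p))) := by
  induction l generalizing s with
  | nil => simp
  | cons p rest ih =>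
    simp only [List.foldl_cons]
    have h1 : (s.foldl (fun newList letter =>
        if letter ∈ p then newList ++ [letter] else newList) [])
        = s.filter (fun c => decide (c ∈ p)) := by
      simpa using PySem.List.foldl_append_if (fun c => decide (c ∈ p)) id s []
    rw [h1, ih, List.filter_filter]
    exact List.filter_congr (fun a _ => by simp [Bool.and_comm])

-- counting distinct letters over all persons = "how many persons contain the letter"
theorem pv_countL (ps : List (List Char)) (c : Char) :
    ((ps.map (fun p => PySem.Set.ofList p)).flatten).count c
      = ps.countP (fun p => decide (c ∈ p)) := by
  induction ps with
  | nil => simp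
  | cons p rest ih =>
    simp only [List.map_cons, List.flatten_cons, List.count_append, List.countP_cons, ih]
    by_cases h : c ∈ p
    · rw [List.count_eq_one_of_mem (PySem.Set.nodup_ofList p)
        ((PySem.Set.mem_ofList p c).mpr h)]
      simp [h, Nat.add_comm]
    · rw [List.count_eq_zero_of_not_mem (fun hc => h ((PySem.Set.mem_ofList p c).mp hc))]
      simp [h]

theorem pv_count_fold (l : List Int) (n a : Int) :
    l.foldl (fun acc v => if v = n then acc + 1 else acc) a
      = a + (l.countP (fun v => decide (v = n)) : Int) := by
  induction l generalizing a with
  | nil => simp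
  | cons x xs ih =>
    simp only [List.foldl_cons, List.countP_cons, ih]
    by_cases h : x = n <;> simp [h] <;> ring

-- the core equality, for an arbitrary split result ps
theorem pv_key (ps : List (List Char)) :
    ((ps.foldl
        (fun uq person =>
          uq.foldl (fun newList letter =>
            if letter ∈ person then newList ++ [letter] else newList) [])
        ((PySem.List.pyGetD ps 0 []).foldl PySem.Set.add PySem.Set.empty)).length : Int)
    = (ps.foldl
        (fun d person =>
          (PySem.Set.ofList person).foldl (fun d letter => d.modify letter 0 (· + 1)) d)
        PySem.Dict.empty).values.foldl
        (fun acc v => if v = (ps.length : Int) then acc + 1 else acc) 0 := by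
  have hcounts : (ps.foldl
        (fun d person =>
          (PySem.Set.ofList person).foldl (fun d letter => d.modify letter 0 (· + 1)) d)
        PySem.Dict.empty)
      = PySem.Dict.counter ((ps.map (fun p => PySem.Set.ofList p)).flatten) := by
    rw [PySem.Dict.counter_eq_foldl, List.foldl_flatten, List.foldl_map]
  rw [hcounts, pv_filt_loop,
      PySem.Dict.values_eq_map_keys _ (PySem.Dict.nodup_keys_counter _) 0,
      pv_count_fold, List.countP_map, PySem.Dict.keys_counter]
  simp only [Int.zero_add, Function.comp_def, PySem.Dict.getD_counter, pv_countL]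
  rw [show (PySem.Set.empty : PySem.Set Char) = [] from rfl, ← PySem.Set.ofList_eq_foldl]
  rw [List.countP_eq_length_filter]
  congr 1
  apply List.Perm.length_eq
  refine (List.perm_ext_iff_of_nodup
      ((PySem.Set.nodup_ofList _).filter _) ((PySem.Set.nodup_ofList _).filter _)).mpr ?_
  intro c
  simp only [List.mem_filter, PySem.Set.mem_ofList, List.all_eq_true, decide_eq_true_eq,
    Nat.cast_inj]
  cases ps with
  | nil => simp [PySem.List.pyGetD, PySem.List.pyGet?, PySem.List.pyIdx?]
  | cons p rest =>
    constructor
    · rintro ⟨hmem, hall⟩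
      have hp0 : c ∈ p := by simpa [PySem.List.pyGetD_zero_cons] using hmem
      refine ⟨List.mem_flatten.mpr ⟨PySem.Set.ofList p,
        List.mem_map.mpr ⟨p, List.mem_cons_self, rfl⟩, (PySem.Set.mem_ofList p c).mpr hp0⟩, ?_⟩
      exact_mod_cast List.countP_eq_length.mpr (fun q hq => decide_eq_true (hall q hq))
    · rintro ⟨hmem, hcnt⟩
      have hcnt' : (p :: rest).countP (fun q => decide (c ∈ q)) = (p :: rest).length := by
        exact_mod_cast hcnt
      have hall : ∀ q ∈ p :: rest, c ∈ q := fun q hq => by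
        simpa using List.countP_eq_length.mp hcnt' q hq
      exact ⟨by simpa [PySem.List.pyGetD_zero_cons] using hall p List.mem_cons_self,
        fun q hq => hall q hq⟩

-- ===== VERDICT (by name: the statement is the Claim_ definition above) =====
theorem analyze2_spec : Claim_equal_analyze2 := by
  intro group _
  unfold Spec_analyze2 analyze2 analyze2_alt
  exact pv_key (PySem.Chars.splitOn group.toList "\n".toList)
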